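-- pv_equiv track=rewrite | github.com/moonimooni/algo-python | 국내기업 기출/210322_programmers_17681.py | solution
-- ===== SOURCE A (Python) =====
-- def converter(n, length):
--     result = format(n, 'b')
--     while len(result) != length:
--         result = '0' + result
--     return result
--
-- def solution(n, arr1, arr2):
--     answer = ['']*n
--     for i in range(n):
--
--         arr1_val = converter(arr1[i], n)
--         arr2_val = converter(arr2[i], n)
--
--         for j in range(n):
--             if arr1_val[j] == '1' or arr2_val[j] == '1':
--                 answer[i] += '#'
--             else:
--                 answer[i] += ' '
--
--     return answer
-- ===== SOURCE B (Python) =====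
-- _TR = str.maketrans('10', '# ')
--
-- def solution(n, arr1, arr2):
--     return [format(abs(arr1[i]) | abs(arr2[i]), 'b').zfill(n).translate(_TR) for i in range(n)]
-- ===== Notes on version B (the rewrite author's own statement) =====
-- stated objective: simpler
-- what changed: B computes each row as one integer bitwise OR of the entries' absolute values (A only ever tests for '1' characters, so the sign contributes nothing) and renders it with a single bulk format/zfill/translate pass, replacing A's per-character inner loop over two separately zero-prepend-padded binary strings.
import Mathlib
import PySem

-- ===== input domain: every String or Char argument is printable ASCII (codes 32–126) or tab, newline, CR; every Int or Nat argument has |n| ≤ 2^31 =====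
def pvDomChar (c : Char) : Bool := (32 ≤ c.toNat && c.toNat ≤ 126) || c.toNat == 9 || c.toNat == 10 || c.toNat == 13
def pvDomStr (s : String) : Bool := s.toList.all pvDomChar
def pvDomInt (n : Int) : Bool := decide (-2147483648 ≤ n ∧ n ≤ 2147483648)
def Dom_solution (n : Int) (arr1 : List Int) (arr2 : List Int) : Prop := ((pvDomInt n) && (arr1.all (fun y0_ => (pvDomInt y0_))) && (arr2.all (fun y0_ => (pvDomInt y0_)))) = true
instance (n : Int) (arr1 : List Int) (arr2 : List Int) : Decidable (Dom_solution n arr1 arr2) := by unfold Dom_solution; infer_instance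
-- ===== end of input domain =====

-- B replaces A's per-character inner loop and manual zero-prepend padding by one integer
-- bitwise OR per row rendered with a bulk zfill + glyph translation (objective: simpler).

-- ===== PORT A =====

-- format(v, 'b') for v ≥ 0: binary digits, most significant first, '0' for 0.
-- Shared by both ports (both Pythons call the same builtin format(·, 'b')).
def binGo : Nat → List Char
  | 0 => []
  | v + 1 => binGo ((v + 1) / 2) ++ [if (v + 1) % 2 = 1 then '1' else '0']
decreasing_by omega

def binChars (v : Nat) : List Char := if v = 0 then ['0'] else binGo v

-- format(a, 'b') for any int: a '-' sign precedes the digits of |a|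
def pyBinFmt (a : Int) : List Char := if a < 0 then '-' :: binChars (-a).toNat else binChars a.toNat

-- the "while len(result) != length: result = '0' + result" loop of A's converter;
-- the fuel bounds the prepends (it is sufficient whenever the Python loop terminates).
def convLoop (length : Int) : Nat → List Char → List Char
  | 0, s => s
  | fuel + 1, s => if (s.length : Int) = length then s else convLoop length fuel ('0' :: s)

-- port of A's converter
def converter (a : Int) (length : Int) : List Char :=
  convLoop length (length.toNat + 1) (pyBinFmt a)

def solution (n : Int) (arr1 : List Int) (arr2 : List Int) : List String :=
  (PySem.List.pyRange 0 n 1).map (fun i =>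
    let arr1_val := converter (PySem.List.pyGetD arr1 i 0) n
    let arr2_val := converter (PySem.List.pyGetD arr2 i 0) n
    String.mk ((PySem.List.pyRange 0 n 1).foldl (fun acc j =>
      if PySem.List.pyGetD arr1_val j ' ' = '1' ∨ PySem.List.pyGetD arr2_val j ' ' = '1'
      then acc ++ ['#'] else acc ++ [' ']) []))

-- ===== PORT B =====

-- .zfill(n) of a nonnegative number's digit string
def padTo (m : Nat) (s : List Char) : List Char := List.replicate (m - s.length) '0' ++ s

-- .translate(str.maketrans('10', '# '))
def glyph (c : Char) : Char := if c = '1' then '#' else if c = '0' then ' ' else c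

def solution_alt (n : Int) (arr1 : List Int) (arr2 : List Int) : List String :=
  (PySem.List.pyRange 0 n 1).map (fun i =>
    let row : Nat := (PySem.List.pyGetD arr1 i 0).natAbs ||| (PySem.List.pyGetD arr2 i 0).natAbs
    String.mk ((padTo n.toNat (binChars row)).map glyph))

-- ===== PRECONDITION & SPEC =====
-- Pre_ excludes exactly the inputs on which A does not return: lists shorter than n
-- (IndexError) and entries whose binary rendering — including a possible '-' sign —
-- needs more than n characters, on which A's zero-prepend loop diverges.
def Pre_solution (n : Int) (arr1 : List Int) (arr2 : List Int) : Prop :=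
  n ≤ arr1.length ∧ n ≤ arr2.length ∧
  (∀ x ∈ arr1.take n.toNat, (0 ≤ x → x < 2 ^ n.toNat) ∧ (x < 0 → -x < 2 ^ (n.toNat - 1))) ∧
  (∀ x ∈ arr2.take n.toNat, (0 ≤ x → x < 2 ^ n.toNat) ∧ (x < 0 → -x < 2 ^ (n.toNat - 1)))

instance (n : Int) (arr1 : List Int) (arr2 : List Int) : Decidable (Pre_solution n arr1 arr2) := by
  unfold Pre_solution; infer_instance

def pvWitness_solution : Int × List Int × List Int := (3, [4, -2, 5], [3, 0, 7])

def Spec_solution (n : Int) (arr1 : List Int) (arr2 : List Int) (out : List String) : Prop := out = solution_alt n arr1 arr2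
instance (n : Int) (arr1 : List Int) (arr2 : List Int) (out : List String) : Decidable (Spec_solution n arr1 arr2 out) := by unfold Spec_solution; infer_instance

-- ===== CLAIM (what is proved, stated in full; the proofs are below) =====
def Claim_equal_solution : Prop := ∀ (n : Int) (arr1 : List Int) (arr2 : List Int), Dom_solution n arr1 arr2 → Pre_solution n arr1 arr2 → Spec_solution n arr1 arr2 (solution n arr1 arr2)

-- ===== LEMMAS AND PROOFS =====

-- big-endian bit string of v, m digits
def bitsBE (m v : Nat) : List Char :=
  (List.range m).map (fun k => if v.testBit (m - 1 - k) then '1' else '0')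

theorem bitsBE_succ (m v : Nat) :
    bitsBE (m + 1) v = bitsBE m (v / 2) ++ [if v % 2 = 1 then '1' else '0'] := by
  unfold bitsBE
  rw [List.range_succ, List.map_append, List.map_singleton]
  congr 1
  · apply List.map_congr_left
    intro k hk
    rw [List.mem_range] at hk
    rw [show m + 1 - 1 - k = (m - 1 - k) + 1 from by omega, ← Nat.testBit_div_two]
  · rw [show m + 1 - 1 - m = 0 from by omega, Nat.testBit_zero]
    rcases Nat.mod_two_eq_zero_or_one v with h | h <;> simp [h]

theorem binGo_eq (v : Nat) (hv : 1 ≤ v) :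
    binGo v = binGo (v / 2) ++ [if v % 2 = 1 then '1' else '0'] := by
  obtain ⟨w, rfl⟩ : ∃ w, v = w + 1 := ⟨v - 1, by omega⟩
  rw [binGo]

theorem binChars_zero : binChars 0 = ['0'] := by rw [binChars]; rfl
theorem binChars_one : binChars 1 = ['1'] := by
  rw [binChars]; norm_num; rw [binGo, binGo]; rfl

theorem padTo_small (m : Nat) (hm : 1 ≤ m) (c : Char) :
    padTo (m + 1) [c] = padTo m ['0'] ++ [c] := by
  simp only [padTo, List.length_singleton, List.append_assoc, List.singleton_append]
  rw [show m + 1 - 1 = (m - 1) + 1 from by omega, List.replicate_succ']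
  simp

theorem padTo_bitsBE : ∀ (m v : Nat), 1 ≤ m → v < 2 ^ m → padTo m (binChars v) = bitsBE m v := by
  intro m
  induction m with
  | zero => omega
  | succ m ih =>
    intro v _ hv
    rcases Nat.eq_zero_or_pos m with rfl | hm
    · interval_cases v
      · rw [binChars_zero]; rfl
      · rw [binChars_one]; rfl
    · have hdiv : v / 2 < 2 ^ m := by
        have h2 : (2:Nat)^(m+1) = 2*2^m := by ring
        omega
      rw [bitsBE_succ, ← ih (v / 2) hm hdiv]
      rcases Nat.lt_or_ge v 2 with h2 | h2
      · interval_cases v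
        · rw [binChars_zero]
          simpa using padTo_small m hm '0'
        · norm_num
          rw [binChars_one, binChars_zero]
          simpa using padTo_small m hm '1'
      · have hv0 : binChars v = binGo v := by rw [binChars, if_neg (by omega)]
        have hv2 : binChars (v / 2) = binGo (v / 2) := by rw [binChars, if_neg (by omega)]
        rw [hv0, hv2, binGo_eq v (by omega)]
        simp only [padTo, List.length_append, List.length_singleton, List.append_assoc]
        congr 2
        omega

theorem length_binChars_le (m v : Nat) (hm : 1 ≤ m) (hv : v < 2 ^ m) :
    (binChars v).length ≤ m := by
  have h := congrArg List.length (padTo_bitsBE m v hm hv)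
  simp [padTo, bitsBE] at h
  omega

theorem convLoop_eq (w : Int) (hw : 0 ≤ w) :
    ∀ (fuel : Nat) (s : List Char), s.length ≤ w.toNat → w.toNat - s.length < fuel →
    convLoop w fuel s = List.replicate (w.toNat - s.length) '0' ++ s := by
  intro fuel
  induction fuel with
  | zero => omega
  | succ fuel ih =>
    intro s hs hf
    rw [convLoop]
    by_cases h : (s.length : Int) = w
    · rw [if_pos h, show w.toNat - s.length = 0 from by omega, List.replicate_zero, List.nil_append]
    · have hlen : s.length < w.toNat := by omega
      rw [if_neg h, ih ('0' :: s) (by simpa using hlen) (by simp; omega)]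
      rw [show w.toNat - s.length = (w.toNat - ('0'::s).length) + 1 from by simp; omega,
          List.replicate_succ', List.append_assoc]
      rfl

-- the per-element Pre_ condition: A's digit string for a fits in m characters
def FitsIn (m : Nat) (a : Int) : Prop :=
  (0 ≤ a → a < 2 ^ m) ∧ (a < 0 → -a < 2 ^ (m - 1))

theorem natAbs_lt (m : Nat) (a : Int) (hm : 1 ≤ m) (h : FitsIn m a) : a.natAbs < 2 ^ m := by
  obtain ⟨h1, h2⟩ := h
  have hc : ((2:Int) ^ m) = ((2 ^ m : Nat) : Int) := by push_cast; ring
  have hc2 : ((2:Int) ^ (m-1)) = ((2 ^ (m-1) : Nat) : Int) := by push_cast; ring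
  have hmono : (2:Nat) ^ (m-1) ≤ 2 ^ m := Nat.pow_le_pow_right (by omega) (by omega)
  rcases Int.lt_or_le a 0 with h' | h'
  · have := h2 h'; omega
  · have := h1 h'; omega

theorem fmt_length_le (m : Nat) (a : Int) (hm : 1 ≤ m) (h : FitsIn m a) :
    (pyBinFmt a).length ≤ m := by
  unfold pyBinFmt
  split_ifs with hneg
  · have ha : (-a).toNat < 2 ^ (m - 1) := by
      have := h.2 hneg
      have hc2 : ((2:Int) ^ (m-1)) = ((2 ^ (m-1) : Nat) : Int) := by push_cast; ring
      omega
    have h1 : 1 ≤ (-a).toNat := by omega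
    have hm2 : 2 ≤ m := by
      rcases Nat.lt_or_ge m 2 with hm' | hm'
      · interval_cases m <;> simp_all <;> omega
      · exact hm'
    have := length_binChars_le (m - 1) (-a).toNat (by omega) ha
    simp
    omega
  · have ha : a.toNat < 2 ^ m := by
      have := h.1 (by omega)
      have hc : ((2:Int) ^ m) = ((2 ^ m : Nat) : Int) := by push_cast; ring
      omega
    exact length_binChars_le m a.toNat hm ha

theorem map_isOne_eq (m : Nat) (a : Int) (hm : 1 ≤ m) (h : FitsIn m a) :
    (padTo m (pyBinFmt a)).map (fun c => c == '1') =
    (bitsBE m a.natAbs).map (fun c => c == '1') := by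
  rcases Int.lt_or_le a 0 with hneg | hpos
  · have hw1 : 1 ≤ (-a).toNat := by omega
    have hwm : (-a).toNat < 2 ^ (m - 1) := by
      have := h.2 hneg
      have hc2 : ((2:Int) ^ (m-1)) = ((2 ^ (m-1) : Nat) : Int) := by push_cast; ring
      omega
    have hm2 : 2 ≤ m := by
      rcases Nat.lt_or_ge m 2 with hm' | hm'
      · interval_cases m <;> simp_all <;> omega
      · exact hm'
    have habs : a.natAbs = (-a).toNat := by omega
    have hwlt : (-a).toNat < 2 ^ m := by
      have hmono : (2:Nat) ^ (m-1) ≤ 2 ^ m := Nat.pow_le_pow_right (by omega) (by omega)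
      omega
    have hlen : (binChars (-a).toNat).length ≤ m - 1 :=
      length_binChars_le (m - 1) (-a).toNat (by omega) hwm
    rw [habs, ← padTo_bitsBE m (-a).toNat hm hwlt]
    rw [pyBinFmt, if_pos hneg]
    unfold padTo
    simp only [List.map_append, List.map_replicate, List.map_cons, List.length_cons]
    rw [show ((('-' : Char) == '1')) = (('0' : Char) == '1') from rfl]
    rw [show m - (binChars (-a).toNat).length
        = (m - ((binChars (-a).toNat).length + 1)) + 1 from by omega]
    rw [List.replicate_succ', List.append_assoc]
    rfl
  · rw [pyBinFmt, if_neg (by omega), show a.natAbs = a.toNat from by omega]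
    rw [padTo_bitsBE m a.toNat hm (by
      have := h.1 hpos
      have hc : ((2:Int) ^ m) = ((2 ^ m : Nat) : Int) := by push_cast; ring
      omega)]

theorem padTo_length (m : Nat) (s : List Char) (h : s.length ≤ m) :
    (padTo m s).length = m := by simp [padTo]; omega

theorem converter_eq (a n : Int) (hn : 1 ≤ n) (hlen : (pyBinFmt a).length ≤ n.toNat) :
    converter a n = padTo n.toNat (pyBinFmt a) := by
  unfold converter padTo
  exact convLoop_eq n (by omega) (n.toNat + 1) _ hlen (by omega)

theorem getElem_isOne (m : Nat) (a : Int) (hm : 1 ≤ m) (h : FitsIn m a) (k : Nat) (hk : k < m) :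
    ((padTo m (pyBinFmt a))[k]'(by rw [padTo_length m _ (fmt_length_le m a hm h)]; exact hk) = '1')
    ↔ a.natAbs.testBit (m - 1 - k) = true := by
  have hlen1 : k < ((padTo m (pyBinFmt a)).map (fun c => c == '1')).length := by
    rw [List.length_map, padTo_length m _ (fmt_length_le m a hm h)]; exact hk
  have hb := List.getElem_of_eq (map_isOne_eq m a hm h) hlen1
  simp only [List.getElem_map] at hb
  simp only [bitsBE, List.getElem_map, List.getElem_range] at hb
  by_cases ht : a.natAbs.testBit (m - 1 - k)
  · simp [ht] at hb ⊢
    exact hb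
  · simp [ht] at hb ⊢
    intro hc
    rw [hc] at hb
    simp at hb

theorem row_eq (n : Int) (hn1 : 1 ≤ n) (a b : Int)
    (hA : FitsIn n.toNat a) (hB : FitsIn n.toNat b) :
    ((PySem.List.pyRange 0 n 1).foldl (fun acc j =>
      if PySem.List.pyGetD (converter a n) j ' ' = '1' ∨ PySem.List.pyGetD (converter b n) j ' ' = '1'
      then acc ++ ['#'] else acc ++ [' ']) []) =
    (padTo n.toNat (binChars (a.natAbs ||| b.natAbs))).map glyph := by
  have hm : 1 ≤ n.toNat := by omega
  have hx := natAbs_lt n.toNat a hm hA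
  have hy := natAbs_lt n.toNat b hm hB
  have hxy : a.natAbs ||| b.natAbs < 2 ^ n.toNat := Nat.bitwise_lt_two_pow hx hy
  have hca := converter_eq a n hn1 (fmt_length_le n.toNat a hm hA)
  have hcb := converter_eq b n hn1 (fmt_length_le n.toNat b hm hB)
  rw [padTo_bitsBE n.toNat _ hm hxy, hca, hcb]
  rw [show (fun (acc : List Char) (j : Int) =>
      if PySem.List.pyGetD (padTo n.toNat (pyBinFmt a)) j ' ' = '1' ∨ PySem.List.pyGetD (padTo n.toNat (pyBinFmt b)) j ' ' = '1'
      then acc ++ ['#'] else acc ++ [' ']) = (fun acc j => acc ++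
        [if PySem.List.pyGetD (padTo n.toNat (pyBinFmt a)) j ' ' = '1' ∨ PySem.List.pyGetD (padTo n.toNat (pyBinFmt b)) j ' ' = '1'
         then '#' else ' ']) from by funext acc j; split_ifs <;> rfl]
  rw [PySem.List.foldl_append_singleton_eq_map, List.nil_append]
  rw [PySem.List.pyRange_one]
  unfold bitsBE
  rw [List.map_map, List.map_map]
  rw [show (n - 0).toNat = n.toNat from by omega]
  apply List.map_congr_left
  intro k hk
  rw [List.mem_range] at hk
  have hla : k < (padTo n.toNat (pyBinFmt a)).length := by
    rw [padTo_length _ _ (fmt_length_le n.toNat a hm hA)]; exact hk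
  have hlb : k < (padTo n.toNat (pyBinFmt b)).length := by
    rw [padTo_length _ _ (fmt_length_le n.toNat b hm hB)]; exact hk
  have hga : PySem.List.pyGetD (padTo n.toNat (pyBinFmt a)) (0 + (k : Int)) ' '
      = (padTo n.toNat (pyBinFmt a))[k] := by
    rw [zero_add, PySem.List.pyGetD_natCast, List.getD_eq_getElem _ _ hla]
  have hgb : PySem.List.pyGetD (padTo n.toNat (pyBinFmt b)) (0 + (k : Int)) ' '
      = (padTo n.toNat (pyBinFmt b))[k] := by
    rw [zero_add, PySem.List.pyGetD_natCast, List.getD_eq_getElem _ _ hlb]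
  have hia := getElem_isOne n.toNat a hm hA k hk
  have hib := getElem_isOne n.toNat b hm hB k hk
  simp only [Function.comp_apply, hga, hgb, Nat.testBit_lor]
  by_cases h1 : a.natAbs.testBit (n.toNat - 1 - k) <;>
    by_cases h2 : b.natAbs.testBit (n.toNat - 1 - k) <;>
    simp [h1, h2, glyph, hia, hib]

theorem elem_fits (n : Int) (arr : List Int) (i : Int)
    (hlen : n ≤ (arr.length : Int)) (hi : 0 ≤ i) (hin : i < n)
    (hb : ∀ x ∈ arr.take n.toNat, (0 ≤ x → x < 2 ^ n.toNat) ∧ (x < 0 → -x < 2 ^ (n.toNat - 1))) :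
    FitsIn n.toNat (PySem.List.pyGetD arr i 0) := by
  have hi2 : i.toNat < arr.length := by omega
  have hrw := PySem.List.pyGetD_eq_getElem (xs := arr) (d := 0) hi (show i < (arr.length:Int) by omega)
  rw [hrw]
  have hmem : arr[i.toNat] ∈ arr.take n.toNat := by
    have h1 : i.toNat < (arr.take n.toNat).length := by simp; omega
    have h2 : (arr.take n.toNat)[i.toNat] = arr[i.toNat] := List.getElem_take
    rw [← h2]
    exact List.getElem_mem h1
  exact hb _ hmem

theorem solution_eq_alt (n : Int) (arr1 : List Int) (arr2 : List Int)
    (hpre : Pre_solution n arr1 arr2) : solution n arr1 arr2 = solution_alt n arr1 arr2 := by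
  obtain ⟨hl1, hl2, hb1, hb2⟩ := hpre
  unfold solution solution_alt
  apply List.map_congr_left
  intro i hi
  rw [PySem.List.mem_pyRange_one] at hi
  obtain ⟨hi0, hin⟩ := hi
  have hn1 : 1 ≤ n := by omega
  have hfa := elem_fits n arr1 i hl1 hi0 hin hb1
  have hfb := elem_fits n arr2 i hl2 hi0 hin hb2
  exact congrArg String.mk (row_eq n hn1 _ _ hfa hfb)

-- ===== VERDICT (by name: the statement is the Claim_ definition above) =====
theorem solution_spec : Claim_equal_solution := by
  intro n arr1 arr2 _ hpre
  exact solution_eq_alt n arr1 arr2 hpre
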